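-- pv_equiv track=rewrite | github.com/LibreQoE/LibreQoS | src/LibreQoS.py | _build_shaped_devices_layout
-- ===== SOURCE A (Python) =====
-- def _normalize_shaped_devices_header(header_value):
--     return ''.join(ch for ch in str(header_value).lower() if ch.isalnum())
--
-- _SHAPED_DEVICES_LEGACY_LAYOUT = {
--     'circuitID': 0,
--     'circuitName': 1,
--     'deviceID': 2,
--     'deviceName': 3,
--     'ParentNode': 4,
--     'mac': 5,
--     'ipv4_input': 6,
--     'ipv6_input': 7,
--     'downloadMin': 8,
--     'uploadMin': 9,
--     'downloadMax': 10,
--     'uploadMax': 11,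
--     'comment': 12,
--     'sqm': 13,
-- }
--
-- _SHAPED_DEVICES_HEADER_ALIASES = {
--     'circuitID': {'circuitid'},
--     'circuitName': {'circuitname'},
--     'deviceID': {'deviceid'},
--     'deviceName': {'devicename'},
--     'ParentNode': {'parentnode'},
--     'ParentNodeID': {'parentnodeid'},
--     'AnchorNodeID': {'anchornodeid', 'id'},
--     'mac': {'mac'},
--     'ipv4_input': {'ipv4'},
--     'ipv6_input': {'ipv6'},
--     'downloadMin': {'downloadmin', 'downloadminmbps'},
--     'uploadMin': {'uploadmin', 'uploadminmbps'},
--     'downloadMax': {'downloadmax', 'downloadmaxmbps'},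
--     'uploadMax': {'uploadmax', 'uploadmaxmbps'},
--     'comment': {'comment'},
--     'sqm': {'sqm'},
-- }
--
-- def _build_shaped_devices_layout(header_row):
--     layout = dict(_SHAPED_DEVICES_LEGACY_LAYOUT)
--     layout['ParentNodeID'] = None
--     layout['AnchorNodeID'] = None
--     for idx, header in enumerate(header_row):
--         normalized = _normalize_shaped_devices_header(header)
--         for field, aliases in _SHAPED_DEVICES_HEADER_ALIASES.items():
--             if normalized in aliases:
--                 layout[field] = idx
--                 break
--     return layout
-- ===== SOURCE B (Python) =====
-- def _normalize_shaped_devices_header(header_value):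
--     return ''.join(ch for ch in str(header_value).lower() if ch.isalnum())
--
-- _SHAPED_DEVICES_LEGACY_LAYOUT = {
--     'circuitID': 0,
--     'circuitName': 1,
--     'deviceID': 2,
--     'deviceName': 3,
--     'ParentNode': 4,
--     'mac': 5,
--     'ipv4_input': 6,
--     'ipv6_input': 7,
--     'downloadMin': 8,
--     'uploadMin': 9,
--     'downloadMax': 10,
--     'uploadMax': 11,
--     'comment': 12,
--     'sqm': 13,
-- }
--
-- _SHAPED_DEVICES_HEADER_ALIASES = {
--     'circuitID': {'circuitid'},
--     'circuitName': {'circuitname'},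
--     'deviceID': {'deviceid'},
--     'deviceName': {'devicename'},
--     'ParentNode': {'parentnode'},
--     'ParentNodeID': {'parentnodeid'},
--     'AnchorNodeID': {'anchornodeid', 'id'},
--     'mac': {'mac'},
--     'ipv4_input': {'ipv4'},
--     'ipv6_input': {'ipv6'},
--     'downloadMin': {'downloadmin', 'downloadminmbps'},
--     'uploadMin': {'uploadmin', 'uploadminmbps'},
--     'downloadMax': {'downloadmax', 'downloadmaxmbps'},
--     'uploadMax': {'uploadmax', 'uploadmaxmbps'},
--     'comment': {'comment'},
--     'sqm': {'sqm'},
-- }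
--
-- def _build_shaped_devices_layout(header_row):
--     # Field-major traversal: normalize the headers once, then for each field
--     # take the LAST header column whose normalized form is one of its aliases
--     # (last-wins, matching dict overwrite), falling back to the legacy index
--     # (or None for ParentNodeID/AnchorNodeID). Correct because the alias sets
--     # are pairwise disjoint, so each header column can match at most one field.
--     normalized = [_normalize_shaped_devices_header(h) for h in header_row]
--     defaults = list(_SHAPED_DEVICES_LEGACY_LAYOUT.items()) + [
--         ('ParentNodeID', None), ('AnchorNodeID', None)]
--     layout = {}
--     for field, value in defaults:
--         aliases = _SHAPED_DEVICES_HEADER_ALIASES[field]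
--         for idx, token in enumerate(normalized):
--             if token in aliases:
--                 value = idx
--         layout[field] = value
--     return layout
-- ===== Notes on version B (the rewrite author's own statement) =====
-- stated objective: alternative
-- what changed: Field-major instead of header-major: B normalizes the headers once, then for each of the 16 fields scans the normalized headers for the last matching alias (correct because alias sets are disjoint), building the result in the fixed key order directly instead of A's per-header alias scan with break that overwrites a pre-seeded dict.
import Mathlib
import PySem

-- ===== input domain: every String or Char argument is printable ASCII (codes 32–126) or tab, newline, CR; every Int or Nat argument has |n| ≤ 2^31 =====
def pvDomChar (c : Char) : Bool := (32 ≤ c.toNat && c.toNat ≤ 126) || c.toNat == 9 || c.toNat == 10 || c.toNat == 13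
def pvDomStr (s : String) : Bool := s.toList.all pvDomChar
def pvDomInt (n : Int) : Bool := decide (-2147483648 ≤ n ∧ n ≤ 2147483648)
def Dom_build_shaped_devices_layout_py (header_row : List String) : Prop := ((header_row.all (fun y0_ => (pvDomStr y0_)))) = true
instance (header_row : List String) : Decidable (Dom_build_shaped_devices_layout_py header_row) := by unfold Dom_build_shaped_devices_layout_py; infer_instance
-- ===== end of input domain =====

-- B is field-major where A is header-major: B normalizes the headers once, then for each
-- field keeps the LAST matching column index (alias sets are disjoint); same exact result.

-- shared module constants / helper (identical lines of the Python module, used by both A and B)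
def pvNormalize (s : String) : String :=
  String.ofList ((PySem.Chars.lower s.toList).filter (fun c => PySem.Chars.isalnum c))

def pvAliasTable : List (String × List String) :=
  [("circuitID", ["circuitid"]),
   ("circuitName", ["circuitname"]),
   ("deviceID", ["deviceid"]),
   ("deviceName", ["devicename"]),
   ("ParentNode", ["parentnode"]),
   ("ParentNodeID", ["parentnodeid"]),
   ("AnchorNodeID", ["anchornodeid", "id"]),
   ("mac", ["mac"]),
   ("ipv4_input", ["ipv4"]),
   ("ipv6_input", ["ipv6"]),
   ("downloadMin", ["downloadmin", "downloadminmbps"]),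
   ("uploadMin", ["uploadmin", "uploadminmbps"]),
   ("downloadMax", ["downloadmax", "downloadmaxmbps"]),
   ("uploadMax", ["uploadmax", "uploadmaxmbps"]),
   ("comment", ["comment"]),
   ("sqm", ["sqm"])]

-- ===== PORT A =====
def pvInitLayout : PySem.Dict String (Option Int) :=
  ((PySem.Dict.ofList
      [("circuitID", some 0), ("circuitName", some 1), ("deviceID", some 2),
       ("deviceName", some 3), ("ParentNode", some 4), ("mac", some 5),
       ("ipv4_input", some 6), ("ipv6_input", some 7), ("downloadMin", some 8),
       ("uploadMin", some 9), ("downloadMax", some 10), ("uploadMax", some 11),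
       ("comment", some 12), ("sqm", some 13)]).insert "ParentNodeID" none).insert
    "AnchorNodeID" none

-- A's inner loop over the alias table with `break`: first field whose alias set contains t
def pvFindField : List (String × List String) → String → Option String
  | [], _ => none
  | (f, as) :: rest, t => if as.contains t then some f else pvFindField rest t

-- A's loop body: one header column updates the layout dict
def pvAStep (layout : PySem.Dict String (Option Int)) (p : Int × String) :
    PySem.Dict String (Option Int) :=
  match pvFindField pvAliasTable (pvNormalize p.2) with
  | some f => layout.insert f (some p.1)
  | none => layout

def build_shaped_devices_layout_py (header_row : List String) : List (String × Option Int) :=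
  ((PySem.List.enumerate header_row 0).foldl pvAStep pvInitLayout).items

-- ===== PORT B =====
-- the (field, default) pairs: legacy items plus the two None defaults
def pvDefaults : List (String × Option Int) :=
  [("circuitID", some 0), ("circuitName", some 1), ("deviceID", some 2),
   ("deviceName", some 3), ("ParentNode", some 4), ("mac", some 5),
   ("ipv4_input", some 6), ("ipv6_input", some 7), ("downloadMin", some 8),
   ("uploadMin", some 9), ("downloadMax", some 10), ("uploadMax", some 11),
   ("comment", some 12), ("sqm", some 13),
   ("ParentNodeID", none), ("AnchorNodeID", none)]

-- _SHAPED_DEVICES_HEADER_ALIASES[field]; total here because every field of pvDefaults is a key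
def pvAliasesOf (f : String) : List String :=
  ((PySem.Dict.ofList pvAliasTable).get? f).getD []

-- B's inner loop: last column of `normalized` matching the field's aliases, else the default
def pvLastMatch (normalized : List String) (field : String) (dflt : Option Int) : Option Int :=
  (PySem.List.enumerate normalized 0).foldl
    (fun value p => if (pvAliasesOf field).contains p.2 then some p.1 else value) dflt

def build_shaped_devices_layout_py_alt (header_row : List String) :
    List (String × Option Int) :=
  let normalized := header_row.map pvNormalize
  (pvDefaults.foldl
      (fun layout fd => layout.insert fd.1 (pvLastMatch normalized fd.1 fd.2))
      PySem.Dict.empty).items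

-- ===== PRECONDITION & SPEC =====
def Spec_build_shaped_devices_layout_py (header_row : List String) (out : List (String × Option Int)) : Prop := out = build_shaped_devices_layout_py_alt header_row
instance (header_row : List String) (out : List (String × Option Int)) : Decidable (Spec_build_shaped_devices_layout_py header_row out) := by unfold Spec_build_shaped_devices_layout_py; infer_instance

-- ===== CLAIM (what is proved, stated in full; the proofs are below) =====
def Claim_equal_build_shaped_devices_layout_py : Prop := ∀ (header_row : List String), Dom_build_shaped_devices_layout_py header_row → Spec_build_shaped_devices_layout_py header_row (build_shaped_devices_layout_py header_row)

-- ===== LEMMAS AND PROOFS =====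

-- a found field is a field name of the table
theorem pv_findField_mem (tab : List (String × List String)) (t k : String)
    (h : pvFindField tab t = some k) : k ∈ tab.map Prod.fst := by
  induction tab with
  | nil => simp [pvFindField] at h
  | cons p rest ih =>
      obtain ⟨f, as⟩ := p
      simp only [pvFindField] at h
      by_cases hc : t ∈ as
      · simp [hc] at h; simp [h]
      · simp only [List.map_cons, List.mem_cons]
        refine Or.inr (ih ?_)
        simpa [hc] using h

-- with distinct field names and pairwise disjoint alias lists, A's first-match scan
-- returns field k exactly when k's own alias list contains the token
theorem pv_findField_iff (tab : List (String × List String))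
    (hnd : (tab.map Prod.fst).Nodup)
    (hdj : tab.Pairwise (fun p q => ∀ a, a ∈ p.2 → a ∉ q.2))
    (k : String) (as : List String) (hmem : (k, as) ∈ tab) (t : String) :
    pvFindField tab t = some k ↔ as.contains t = true := by
  rw [List.contains_eq_mem, decide_eq_true_eq]
  induction tab with
  | nil => simp at hmem
  | cons p rest ih =>
      obtain ⟨f, fs⟩ := p
      simp only [List.map_cons, List.nodup_cons] at hnd
      rw [List.pairwise_cons] at hdj
      simp only [pvFindField]
      by_cases hc : t ∈ fs
      · rw [if_pos (by simp [hc])]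
        rcases List.mem_cons.mp hmem with heq | hmem'
        · have hk : f = k := congrArg Prod.fst heq.symm
          have has : fs = as := congrArg Prod.snd heq.symm
          subst hk; subst has
          simp [hc]
        · have hfk : f ≠ k := by
            intro h
            exact hnd.1 (h ▸ (List.mem_map.mpr ⟨(k, as), hmem', h ▸ rfl⟩))
          have hnotas : t ∉ as := fun ht => (hdj.1 (k, as) hmem') t hc ht
          simp [hfk, hnotas]
      · rw [if_neg (by simp [hc])]
        rcases List.mem_cons.mp hmem with heq | hmem'
        · have hk : f = k := congrArg Prod.fst heq.symm
          have has : fs = as := congrArg Prod.snd heq.symm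
          subst hk; subst has
          constructor
          · intro hfind
            exact absurd (pv_findField_mem rest t _ hfind) hnd.1
          · intro hcontra; exact absurd hcontra hc
        · exact ih hnd.2 hdj.2 hmem'

-- A's loop never adds a key: every field name of the alias table is already a key
theorem pv_keys_AStep_fold (ps : List (Int × String))
    (D : PySem.Dict String (Option Int))
    (hD : ∀ f ∈ pvAliasTable.map Prod.fst, D.contains f = true) :
    (ps.foldl pvAStep D).keys = D.keys := by
  induction ps generalizing D with
  | nil => rfl
  | cons p ps ih =>
      simp only [List.foldl_cons]
      rcases hf : pvFindField pvAliasTable (pvNormalize p.2) with _ | f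
      · rw [show pvAStep D p = D by simp [pvAStep, hf]]
        exact ih D hD
      · rw [show pvAStep D p = D.insert f (some p.1) by simp [pvAStep, hf]]
        rw [ih _ (fun g hg => by
          rw [PySem.Dict.contains_insert]
          simp [hD g hg])]
        exact PySem.Dict.keys_insert_of_contains _ _
          (hD f (pv_findField_mem _ _ _ hf))

-- per field: A's final dict value at k is a last-match fold over the same pairs
theorem pv_getD_AStep_fold (k : String) (as : List String)
    (hiff : ∀ t, pvFindField pvAliasTable t = some k ↔ as.contains t = true)
    (ps : List (Int × String)) (D : PySem.Dict String (Option Int)) :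
    (ps.foldl pvAStep D).getD k none
      = ps.foldl
          (fun value p => if as.contains (pvNormalize p.2) then some p.1 else value)
          (D.getD k none) := by
  induction ps generalizing D with
  | nil => rfl
  | cons p ps ih =>
      simp only [List.foldl_cons]
      rcases hf : pvFindField pvAliasTable (pvNormalize p.2) with _ | f
      · have hnot : as.contains (pvNormalize p.2) = false := by
          by_contra hcc
          have := (hiff (pvNormalize p.2)).mpr (by simpa using hcc)
          simp [hf] at this
        rw [show pvAStep D p = D by simp [pvAStep, hf], ih, hnot]
        simp
      · rw [show pvAStep D p = D.insert f (some p.1) by simp [pvAStep, hf], ih]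
        by_cases hk : f = k
        · subst hk
          have hcon : as.contains (pvNormalize p.2) = true := (hiff _).mp hf
          rw [hcon, PySem.Dict.getD_insert_self]
          simp
        · have hnot : as.contains (pvNormalize p.2) = false := by
            by_contra hcc
            have := (hiff (pvNormalize p.2)).mpr (by simpa using hcc)
            rw [hf] at this
            exact hk (Option.some.injEq .. ▸ this)
          rw [hnot, PySem.Dict.getD_insert_of_ne _ _ _ (Ne.symm hk)]
          simp

-- enumerate commutes with map on the payload
theorem pv_enumerate_map {α β : Type} (g : α → β) (xs : List α) (s : Int) :
    PySem.List.enumerate (xs.map g) s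
      = (PySem.List.enumerate xs s).map (fun p => (p.1, g p.2)) := by
  induction xs generalizing s with
  | nil => rfl
  | cons x xs ih => simp [PySem.List.enumerate_cons, ih]

-- B's inner fold, rewritten to run over the raw headers with pvNormalize applied inline
theorem pv_lastMatch_eq (header_row : List String) (k : String) (d : Option Int) :
    pvLastMatch (header_row.map pvNormalize) k d
      = (PySem.List.enumerate header_row 0).foldl
          (fun value p =>
            if (pvAliasesOf k).contains (pvNormalize p.2) then some p.1 else value) d := by
  unfold pvLastMatch
  rw [pv_enumerate_map, List.foldl_map]

-- B's dict is built by inserting 16 fresh distinct keys into the empty dict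
theorem pv_B_items (header_row : List String) :
    build_shaped_devices_layout_py_alt header_row
      = pvDefaults.map
          (fun fd => (fd.1, pvLastMatch (header_row.map pvNormalize) fd.1 fd.2)) := by
  unfold build_shaped_devices_layout_py_alt
  rw [PySem.Dict.items_foldl_insert_fresh
      (k := fun fd : String × Option Int => fd.1)
      (v := fun fd => pvLastMatch (header_row.map pvNormalize) fd.1 fd.2)
      (d := PySem.Dict.empty) (l := pvDefaults)
      (by intro a _; exact PySem.Dict.contains_empty _) (by decide)]
  rfl

theorem build_shaped_devices_layout_py_spec : Claim_equal_build_shaped_devices_layout_py := by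
  intro header_row _
  unfold Spec_build_shaped_devices_layout_py
  rw [pv_B_items]
  unfold build_shaped_devices_layout_py
  have hkeys : ((PySem.List.enumerate header_row 0).foldl pvAStep pvInitLayout).keys
      = pvInitLayout.keys :=
    pv_keys_AStep_fold _ _ (by decide)
  rw [PySem.Dict.items_eq_map_keys _ (by rw [hkeys]; decide) none, hkeys]
  rw [show pvInitLayout.keys = pvDefaults.map Prod.fst from by decide, List.map_map]
  apply List.map_congr_left
  intro fd hfd
  simp only [Function.comp]
  rw [pv_lastMatch_eq]
  rw [pv_getD_AStep_fold fd.1 (pvAliasesOf fd.1)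
      (pv_findField_iff pvAliasTable (by decide) (by decide) fd.1 (pvAliasesOf fd.1)
        (by
          fin_cases hfd <;> decide))]
  rw [show pvInitLayout.getD fd.1 none = fd.2 from by fin_cases hfd <;> decide]
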